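-- pv_equiv track=rewrite | github.com/dospix/math-GUI-app | MathApp.py | is_quadratic
-- ===== SOURCE A (Python) =====
-- def is_quadratic(expression):
--     """Returns True or False depending on whether expression is quadratic or not.
--     Expressions containing x^1 and/or constants are considered quadratic.
--     Negative exponents are assumed to be written in this format: x^(-n).
--     This function only works if expression has correct syntax, only contains the variable x and
--     if '^' is the exponentiation sign."""
--
--     length_expression = len(expression)
--     for i in range(length_expression - 1):
--         if expression[i] == "^":
--             if expression[i + 1].isdigit():
--                 if int(expression[i + 1]) > 2:
--                     return False
--                 elif i < length_expression - 2:
--                     if expression[i + 2].isdigit():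
--                         return False
--                     elif expression[i + 2] == ".":
--                         return False
--             elif expression[i + 1:i + 3] == "(-":
--                 return False
--
--     return True
-- ===== SOURCE B (Python) =====
-- _DIGITS = "0123456789"
-- # every substring whose presence makes the expression non-quadratic
-- _BAD_SUBSTRINGS = (["^(-"]
--                    + ["^" + d for d in "3456789"]
--                    + ["^" + a + b for a in _DIGITS for b in _DIGITS + "."])
--
--
-- def is_quadratic(expression):
--     """An expression is non-quadratic exactly when it contains one of the
--     finitely many forbidden substrings; check containment for each."""
--     return not any(bad in expression for bad in _BAD_SUBSTRINGS)
-- ===== Notes on version B (the rewrite author's own statement) =====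
-- stated objective: alternative
-- what changed: B replaces A's positional character scan (index loop with lookahead at i+1 and i+2) by a precomputed table of all 118 forbidden substrings (caret followed by a big digit, by two digit-ish characters, or by an opening negative exponent) and decides quadraticity by plain substring-containment tests against that table.
import Mathlib
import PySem

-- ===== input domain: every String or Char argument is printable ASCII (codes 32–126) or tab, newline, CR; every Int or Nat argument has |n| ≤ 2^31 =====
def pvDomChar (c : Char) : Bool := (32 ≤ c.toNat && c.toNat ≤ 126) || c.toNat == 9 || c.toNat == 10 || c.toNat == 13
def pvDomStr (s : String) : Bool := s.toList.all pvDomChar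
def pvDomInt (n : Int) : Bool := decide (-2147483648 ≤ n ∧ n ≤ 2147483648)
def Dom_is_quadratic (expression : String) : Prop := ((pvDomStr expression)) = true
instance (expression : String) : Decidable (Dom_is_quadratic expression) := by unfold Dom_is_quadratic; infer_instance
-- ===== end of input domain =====

-- B replaces A's positional scan with lookahead by a precomputed table of all forbidden substrings and plain containment tests (alternative decomposition, same asymptotic cost).

-- ===== PORT A =====
-- A's loop 'for i in range(len-1)' rendered as the structural recursion over the
-- suffix starting at position i; the head is expression[i], 'd' is expression[i+1],
-- 'e' is expression[i+2], and 'rest.take 2' is the clamped slice expression[i+1:i+3].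
-- int(expression[i+1]) is d.toNat - 48, exact on the ASCII digits of Dom.
def scanA : List Char → Bool
  | [] => true
  | c :: rest =>
    if c = '^' then
      match rest with
      | [] => true                                   -- i = len-1 is never reached by the loop
      | d :: rest2 =>
        if PySem.Chars.isdigit d then
          if ((d.toNat : Int) - 48) > 2 then false
          else
            match rest2 with                          -- 'i < length_expression - 2'
            | [] => scanA rest
            | e :: _ =>
              if PySem.Chars.isdigit e then false
              else if e = '.' then false
              else scanA rest
        else if rest.take 2 = ['(', '-'] then false   -- expression[i+1:i+3] == "(-"
        else scanA rest
    else scanA rest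

def is_quadratic (expression : String) : Bool := scanA expression.toList

-- ===== PORT B =====
-- Source B's module-level table: _DIGITS and the comprehensions building _BAD_SUBSTRINGS
def pvDigits : List Char := ['0','1','2','3','4','5','6','7','8','9']

def badSubstrings : List (List Char) :=
  [['^', '(', '-']]                                                         -- ["^(-"]
    ++ (['3','4','5','6','7','8','9'].map (fun d => ['^', d]))              -- ["^"+d for d in "3456789"]
    ++ (pvDigits.flatMap (fun a => (pvDigits ++ ['.']).map (fun b => ['^', a, b])))  -- ["^"+a+b ...]

-- 'not any(bad in expression for bad in _BAD_SUBSTRINGS)'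
def is_quadratic_alt (expression : String) : Bool :=
  ! badSubstrings.any (fun bad => PySem.Chars.isIn bad expression.toList)

-- ===== PRECONDITION & SPEC =====
def Spec_is_quadratic (expression : String) (out : Bool) : Prop := out = is_quadratic_alt expression
instance (expression : String) (out : Bool) : Decidable (Spec_is_quadratic expression out) := by unfold Spec_is_quadratic; infer_instance

-- ===== CLAIM =====
def Claim_equal_is_quadratic : Prop := ∀ (expression : String), Dom_is_quadratic expression → Spec_is_quadratic expression (is_quadratic expression)

-- ===== LEMMAS AND PROOFS =====

-- 'the text starting here makes the expression non-quadratic': the common characterisation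
def headDigitOrDot : List Char → Bool
  | e :: _ => PySem.Chars.isdigit e || e == '.'
  | [] => false

def headIsDash : List Char → Bool
  | e :: _ => e == '-'
  | [] => false

def badHead : List Char → Bool
  | c :: d :: rest =>
    c == '^' &&
    ((PySem.Chars.isdigit d && decide (((d.toNat : Int) - 48) > 2))
      || (PySem.Chars.isdigit d && headDigitOrDot rest)
      || (d == '(' && headIsDash rest))
  | _ => false

theorem char_eq_of_toNat (c : Char) (k : Nat) (hk : c.toNat = k) : c = Char.ofNat k := by
  rw [← Char.ofNat_toNat c, hk]

lemma isdigit_toNat (d : Char) (h : PySem.Chars.isdigit d = true) :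
    48 ≤ d.toNat ∧ d.toNat ≤ 57 := by
  simp [PySem.Chars.isdigit, Char.le_def] at h
  exact h

lemma mem_pvDigits_of (d : Char) (h1 : 48 ≤ d.toNat) (h2 : d.toNat ≤ 57) : d ∈ pvDigits := by
  interval_cases h : d.toNat <;> rw [char_eq_of_toNat d _ h] <;> decide

lemma mem_big_of (d : Char) (h1 : 51 ≤ d.toNat) (h2 : d.toNat ≤ 57) :
    d ∈ (['3','4','5','6','7','8','9'] : List Char) := by
  interval_cases h : d.toNat <;> rw [char_eq_of_toNat d _ h] <;> decide

-- badHead is exactly 'some forbidden substring is a prefix here'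
lemma badHead_iff (t : List Char) :
    badHead t = true ↔ ∃ bad ∈ badSubstrings, bad <+: t := by
  constructor
  · intro h
    match t with
    | [] => simp [badHead] at h
    | [c] => simp [badHead] at h
    | c :: d :: rest =>
      simp only [badHead, Bool.and_eq_true, beq_iff_eq, Bool.or_eq_true, decide_eq_true_eq] at h
      obtain ⟨rfl, h⟩ := h
      rcases h with (⟨hd, hv⟩ | ⟨hd, he⟩) | ⟨rfl, he⟩
      · -- '^' then a digit > 2
        obtain ⟨h48, h57⟩ := isdigit_toNat d hd
        refine ⟨['^', d], ?_, ⟨rest, rfl⟩⟩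
        exact List.mem_cons_of_mem _ (List.mem_append_left _
          (List.mem_map.mpr ⟨d, mem_big_of d (by omega) h57, rfl⟩))
      · -- '^' digit then digit or '.'
        obtain ⟨h48, h57⟩ := isdigit_toNat d hd
        match rest with
        | [] => simp [headDigitOrDot] at he
        | e :: rest2 =>
          refine ⟨['^', d, e], ?_, ⟨rest2, rfl⟩⟩
          refine List.mem_cons_of_mem _ (List.mem_append_right _
            (List.mem_flatMap.mpr ⟨d, mem_pvDigits_of d h48 h57,
              List.mem_map.mpr ⟨e, ?_, rfl⟩⟩))
          simp only [headDigitOrDot, Bool.or_eq_true, beq_iff_eq] at he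
          rcases he with he | rfl
          · obtain ⟨e48, e57⟩ := isdigit_toNat e he
            exact List.mem_append_left _ (mem_pvDigits_of e e48 e57)
          · exact List.mem_append_right _ (List.mem_singleton.mpr rfl)
      · -- '^(-'
        match rest with
        | [] => simp [headIsDash] at he
        | e :: rest2 =>
          simp only [headIsDash, beq_iff_eq] at he
          subst he
          exact ⟨['^', '(', '-'], List.mem_cons_self, ⟨rest2, rfl⟩⟩
  · rintro ⟨bad, hmem, ⟨t2, rfl⟩⟩
    rcases List.mem_cons.mp hmem with rfl | hmem
    · simp [badHead, headIsDash]
    rcases List.mem_append.mp hmem with hmem | hmem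
    · obtain ⟨d, hd, rfl⟩ := List.mem_map.mp hmem
      fin_cases hd <;> simp [badHead] <;> exact Or.inl (by decide)
    · obtain ⟨a, ha, hb⟩ := List.mem_flatMap.mp hmem
      obtain ⟨b, hb2, heq⟩ := List.mem_map.mp hb
      subst heq
      have hda : PySem.Chars.isdigit a = true := by
        fin_cases ha <;> decide
      have hdb : headDigitOrDot (b :: t2) = true := by
        rcases List.mem_append.mp hb2 with hb2 | hb2
        · have : PySem.Chars.isdigit b = true := by fin_cases hb2 <;> decide
          simp [headDigitOrDot, this]
        · rcases List.mem_singleton.mp hb2 with rfl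
          simp [headDigitOrDot]
      simp [badHead, hda, hdb]

-- one step of A's scan: bail out iff the text starting at i is bad, else move on
lemma scanA_cons (c : Char) (rest : List Char) :
    scanA (c :: rest) = (!badHead (c :: rest) && scanA rest) := by
  conv_lhs => rw [scanA.eq_def]
  by_cases hc : c = '^'
  · subst hc
    match rest with
    | [] => decide
    | d :: rest2 =>
      by_cases hd : PySem.Chars.isdigit d
      · by_cases hv : ((d.toNat : Int) - 48) > 2
        · simp [badHead, hd, hv]
        · match rest2 with
          | [] => simp [badHead, hd, hv, headDigitOrDot, headIsDash]
          | e :: rest3 =>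
            by_cases he : PySem.Chars.isdigit e
            · simp [badHead, hd, hv, headDigitOrDot, he]
            · by_cases hp : e = '.'
              · simp [badHead, hd, hv, headDigitOrDot, hp]
              · have hnd : d ≠ '(' := by
                  intro h; subst h; simp [PySem.Chars.isdigit] at hd
                simp [badHead, hd, hv, headDigitOrDot, headIsDash, he, hp, hnd]
      · by_cases hsl : (d :: rest2).take 2 = ['(', '-']
        · match rest2 with
          | [] => simp at hsl
          | e :: rest3 =>
            obtain ⟨rfl, rfl⟩ : d = '(' ∧ e = '-' := by
              simpa using hsl
            simp [badHead, hd, headIsDash]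
        · match rest2 with
          | [] =>
            simp [badHead, hd, headIsDash]
          | e :: rest3 =>
            have hne : ¬ (d = '(' ∧ e = '-') := by
              rintro ⟨rfl, rfl⟩; simp at hsl
            have hq : (d == '(' && e == '-') = false := by
              rcases hq : d == '(' with _ | _
              · simp
              · rcases hr : e == '-' with _ | _
                · simp
                · exact absurd ⟨by simpa using hq, by simpa using hr⟩ hne
            simp [badHead, hd, headIsDash, headDigitOrDot, hq]
            exact fun _ => not_and_or.mp hne
  · have hb : badHead (c :: rest) = false := by
      match rest with
      | [] => simp [badHead]
      | d :: rest2 => simp [badHead, hc]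
    simp [hc, hb]

lemma scanA_eq_tails (l : List Char) : scanA l = ! l.tails.any badHead := by
  induction l with
  | nil => decide
  | cons c rest ih =>
    rw [List.tails_cons, List.any_cons, scanA_cons, ih]
    cases badHead (c :: rest) <;> simp

-- ===== VERDICT =====
theorem is_quadratic_spec : Claim_equal_is_quadratic := by
  intro expression _
  unfold Spec_is_quadratic is_quadratic is_quadratic_alt
  rw [scanA_eq_tails]
  congr 1
  rw [Bool.eq_iff_iff]
  simp only [List.any_eq_true, List.mem_tails]
  constructor
  · rintro ⟨t, hsuf, hbad⟩
    obtain ⟨bad, hmem, hpre⟩ := (badHead_iff t).mp hbad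
    exact ⟨bad, hmem, (PySem.Chars.isIn_iff_infix ..).mpr
      (List.infix_iff_prefix_suffix.mpr ⟨t, hpre, hsuf⟩)⟩
  · rintro ⟨bad, hmem, hin⟩
    obtain ⟨t, hpre, hsuf⟩ := List.infix_iff_prefix_suffix.mp
      ((PySem.Chars.isIn_iff_infix ..).mp hin)
    exact ⟨t, hsuf, (badHead_iff t).mpr ⟨bad, hmem, hpre⟩⟩
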